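-- pv_equiv track=rewrite | github.com/Balaji2404R/Project25 | app.py | format_as_html_list
-- ===== SOURCE A (Python) =====
-- def format_as_html_list(text: str) -> str:
--     lines = text.strip().split("\n")
--     html = "<ol>"
--     in_sublist = False
--
--     for line in lines:
--         line = line.strip()
--         if not line:
--             continue
--
--         if line[0].isdigit() and '.' in line:
--             if in_sublist:
--                 html += "</ul></li>"
--             html += f"<li><strong>{line}</strong><ul>"
--             in_sublist = True
--
--         elif line.startswith("-") or line.startswith("–"):
--             html += f"<li>{line[1:].strip()}</li>"
--
--     if in_sublist:
--         html += "</ul></li>"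
--     html += "</ol>"
--     return html
-- ===== SOURCE B (Python) =====
-- def format_as_html_list(text: str) -> str:
--     # Parse first: loose bullets (before any numbered line) and numbered groups.
--     loose = []
--     groups = []  # list of (header_line, [bullet_texts])
--     for line in text.strip().split("\n"):
--         line = line.strip()
--         if not line:
--             continue
--         if line[0].isdigit() and '.' in line:
--             groups.append((line, []))
--         elif line.startswith("-") or line.startswith("–"):
--             (groups[-1][1] if groups else loose).append(line[1:].strip())
--     # Render second.
--     out = ["<ol>"]
--     out += [f"<li>{b}</li>" for b in loose]
--     for header, bullets in groups:
--         out.append(f"<li><strong>{header}</strong><ul>"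
--                    + "".join(f"<li>{b}</li>" for b in bullets)
--                    + "</ul></li>")
--     out.append("</ol>")
--     return "".join(out)
-- ===== Notes on version B (the rewrite author's own statement) =====
-- stated objective: simpler
-- what changed: Replaced the single pass with an in_sublist flag and manual tag-closing by a parse-then-render split: first build loose bullets and (header, bullets) groups, then emit the HTML structurally.
import Mathlib
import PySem

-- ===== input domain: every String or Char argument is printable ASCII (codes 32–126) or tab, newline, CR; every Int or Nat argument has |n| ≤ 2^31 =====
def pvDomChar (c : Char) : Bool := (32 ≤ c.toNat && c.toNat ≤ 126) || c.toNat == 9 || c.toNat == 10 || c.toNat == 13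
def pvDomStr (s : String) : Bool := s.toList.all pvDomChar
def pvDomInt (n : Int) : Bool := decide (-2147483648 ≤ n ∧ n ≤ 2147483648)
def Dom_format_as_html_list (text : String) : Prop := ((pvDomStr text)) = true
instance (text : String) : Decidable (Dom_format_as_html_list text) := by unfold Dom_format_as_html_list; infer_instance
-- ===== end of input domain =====

-- B replaces A's single pass with an in_sublist flag and manual tag-closing by a
-- parse-then-render split (loose bullets + (header, bullets) groups); objective: simpler.

-- ===== PORT A =====
-- shared line classifiers (the same Python expressions appear verbatim in Source A and Source B)
-- 'line[0].isdigit() and "." in line' — line is nonempty at every use site, so headD is exact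
def fahlIsNum (line : List Char) : Bool :=
  PySem.Chars.isdigit (line.headD ' ') && PySem.Chars.isIn ['.'] line

-- 'line.startswith("-") or line.startswith("–")'
def fahlIsBullet (line : List Char) : Bool :=
  PySem.Chars.startswith line ['-'] || PySem.Chars.startswith line ['–']

-- 'line[1:].strip()'
def fahlBulletText (line : List Char) : List Char :=
  PySem.Chars.strip (PySem.List.slice line (some 1) none)

-- loop body of A: state = (html, in_sublist)
def fahlStepA (st : List Char × Bool) (line0 : List Char) : List Char × Bool :=
  let line := PySem.Chars.strip line0
  if line = [] then st
  else if fahlIsNum line then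
    ((if st.2 then st.1 ++ "</ul></li>".toList else st.1)
       ++ "<li><strong>".toList ++ line ++ "</strong><ul>".toList, true)
  else if fahlIsBullet line then
    (st.1 ++ "<li>".toList ++ fahlBulletText line ++ "</li>".toList, st.2)
  else st

def format_as_html_list (text : String) : String :=
  let lines := PySem.Chars.splitOn (PySem.Chars.strip text.toList) ['\n']
  let st := lines.foldl fahlStepA ("<ol>".toList, false)
  String.mk ((if st.2 then st.1 ++ "</ul></li>".toList else st.1) ++ "</ol>".toList)

-- ===== PORT B =====
-- f"<li>{b}</li>"
def fahlLi (b : List Char) : List Char := "<li>".toList ++ b ++ "</li>".toList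

-- f"<li><strong>{header}</strong><ul>" + "".join(...) + "</ul></li>"
def fahlGroup (g : List Char × List (List Char)) : List Char :=
  "<li><strong>".toList ++ g.1 ++ "</strong><ul>".toList
    ++ (g.2.map fahlLi).flatten ++ "</ul></li>".toList

-- 'groups[-1][1].append(b)' : append b to the bullet list of the last group
def fahlAddToLast (b : List Char) :
    List (List Char × List (List Char)) → List (List Char × List (List Char))
  | [] => []
  | [g] => [(g.1, g.2 ++ [b])]
  | g :: g' :: gs => g :: fahlAddToLast b (g' :: gs)

-- parse pass of B: state = (loose, groups)
def fahlParse (st : List (List Char) × List (List Char × List (List Char)))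
    (line0 : List Char) : List (List Char) × List (List Char × List (List Char)) :=
  let line := PySem.Chars.strip line0
  if line = [] then st
  else if fahlIsNum line then (st.1, st.2 ++ [(line, [])])
  else if fahlIsBullet line then
    if st.2.isEmpty then (st.1 ++ [fahlBulletText line], st.2)
    else (st.1, fahlAddToLast (fahlBulletText line) st.2)
  else st

def format_as_html_list_alt (text : String) : String :=
  let lines := PySem.Chars.splitOn (PySem.Chars.strip text.toList) ['\n']
  let p := lines.foldl fahlParse ([], [])
  String.mk ("<ol>".toList ++ (p.1.map fahlLi).flatten
    ++ (p.2.map fahlGroup).flatten ++ "</ol>".toList)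

-- ===== PRECONDITION & SPEC =====
def Spec_format_as_html_list (text : String) (out : String) : Prop := out = format_as_html_list_alt text
instance (text : String) (out : String) : Decidable (Spec_format_as_html_list text out) := by unfold Spec_format_as_html_list; infer_instance

-- ===== CLAIM (what is proved, stated in full; the proofs are below) =====
def Claim_equal_format_as_html_list : Prop := ∀ (text : String), Dom_format_as_html_list text → Spec_format_as_html_list text (format_as_html_list text)

-- ===== LEMMAS AND PROOFS =====

-- the still-open rendering of the last group (no "</ul></li>" yet)
def fahlOpen (g : List Char × List (List Char)) : List Char :=
  "<li><strong>".toList ++ g.1 ++ "</strong><ul>".toList ++ (g.2.map fahlLi).flatten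

-- A's html after processing a prefix that parsed to (loose, groups)
def fahlP (loose : List (List Char)) (groups : List (List Char × List (List Char))) : List Char :=
  "<ol>".toList ++ (loose.map fahlLi).flatten ++
    match groups.getLast? with
    | none => []
    | some g => (groups.dropLast.map fahlGroup).flatten ++ fahlOpen g

theorem fahlAddToLast_concat (b : List Char) (gs : List (List Char × List (List Char)))
    (g : List Char × List (List Char)) :
    fahlAddToLast b (gs ++ [g]) = gs ++ [(g.1, g.2 ++ [b])] := by
  induction gs with
  | nil => rfl
  | cons x xs ih =>
    cases xs with
    | nil => simp [fahlAddToLast]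
    | cons y ys => simpa [fahlAddToLast] using ih

theorem fahl_main (ls : List (List Char)) :
    ∀ (loose : List (List Char)) (groups : List (List Char × List (List Char))),
    (let st := ls.foldl fahlStepA (fahlP loose groups, !groups.isEmpty)
     (if st.2 then st.1 ++ "</ul></li>".toList else st.1) ++ "</ol>".toList)
    = (let p := ls.foldl fahlParse (loose, groups)
       "<ol>".toList ++ (p.1.map fahlLi).flatten ++ (p.2.map fahlGroup).flatten ++ "</ol>".toList) := by
  induction ls with
  | nil =>
    intro loose groups
    rcases List.eq_nil_or_concat groups with h | ⟨gs, g, h⟩ <;> subst h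
    · simp [fahlP]
    · simp [fahlP, fahlGroup, fahlOpen, List.getLast?_concat]
  | cons l ls ih =>
    intro loose groups
    simp only [List.foldl_cons]
    by_cases hblank : PySem.Chars.strip l = []
    · simp only [fahlStepA, fahlParse, hblank, if_pos rfl, if_true]
      exact ih loose groups
    · by_cases hnum : fahlIsNum (PySem.Chars.strip l) = true
      · have hstep : fahlStepA (fahlP loose groups, !groups.isEmpty) l
            = (fahlP loose (groups ++ [(PySem.Chars.strip l, [])]),
               !(groups ++ [(PySem.Chars.strip l, [])]).isEmpty) := by
          rcases List.eq_nil_or_concat groups with h | ⟨gs, g, h⟩ <;> subst h <;>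
            simp [fahlStepA, fahlParse, hblank, hnum, fahlP, fahlGroup, fahlOpen,
              List.getLast?_concat]
        have hparse : fahlParse (loose, groups) l
            = (loose, groups ++ [(PySem.Chars.strip l, [])]) := by
          simp [fahlParse, hblank, hnum]
        rw [hstep, hparse]
        exact ih loose (groups ++ [(PySem.Chars.strip l, [])])
      · by_cases hbul : fahlIsBullet (PySem.Chars.strip l) = true
        · rcases List.eq_nil_or_concat groups with h | ⟨gs, g, h⟩ <;> subst h <;>
            try simp only [List.concat_eq_append]
          · have hstep : fahlStepA (fahlP loose [], !([] : List (List Char × List (List Char))).isEmpty)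
                l = (fahlP (loose ++ [fahlBulletText (PySem.Chars.strip l)]) [], false) := by
              simp [fahlStepA, hblank, hnum, hbul, fahlP, fahlLi]
            have hparse : fahlParse (loose, []) l
                = (loose ++ [fahlBulletText (PySem.Chars.strip l)], []) := by
              simp [fahlParse, hblank, hnum, hbul]
            rw [hstep, hparse]
            exact ih (loose ++ [fahlBulletText (PySem.Chars.strip l)]) []
          · have h1 : (gs ++ [g]).isEmpty = false := by cases gs <;> rfl
            have h2 : (gs ++ [(g.1, g.2 ++ [fahlBulletText (PySem.Chars.strip l)])]).isEmpty
                = false := by cases gs <;> rfl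
            have hstep : fahlStepA (fahlP loose (gs ++ [g]), !(gs ++ [g]).isEmpty) l
                = (fahlP loose (gs ++ [(g.1, g.2 ++ [fahlBulletText (PySem.Chars.strip l)])]),
                   !(gs ++ [(g.1, g.2 ++ [fahlBulletText (PySem.Chars.strip l)])]).isEmpty) := by
              simp [fahlStepA, hblank, hnum, hbul, fahlP, fahlOpen, fahlLi,
                List.getLast?_concat, h1, h2]
            have hparse : fahlParse (loose, gs ++ [g]) l
                = (loose, gs ++ [(g.1, g.2 ++ [fahlBulletText (PySem.Chars.strip l)])]) := by
              simp [fahlParse, hblank, hnum, hbul, h1, fahlAddToLast_concat]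
            rw [hstep, hparse]
            exact ih loose (gs ++ [(g.1, g.2 ++ [fahlBulletText (PySem.Chars.strip l)])])
        · simp only [fahlStepA, fahlParse, hblank, hnum, hbul, if_neg, if_false,
            Bool.false_eq_true, not_false_eq_true]
          exact ih loose groups

-- ===== VERDICT (by name: the statement is the Claim_ definition above) =====
theorem format_as_html_list_spec : Claim_equal_format_as_html_list := by
  intro text _
  unfold Spec_format_as_html_list format_as_html_list format_as_html_list_alt
  have h := fahl_main (PySem.Chars.splitOn (PySem.Chars.strip text.toList) ['\n']) [] []
  simp only [fahlP, List.map_nil, List.flatten_nil, List.getLast?_nil, List.append_nil,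
    List.isEmpty_nil, Bool.not_true] at h
  exact congrArg String.mk h
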